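-- pv_equiv track=rewrite | github.com/zhwangs/public-archive-Nonequilibrium-origin-of-native-ring-anisotropy-in-amorphous-systems | NRS_ISF_MC_sampling/plot_coord.py | alternate_repeat
-- ===== SOURCE A (Python) =====
-- def alternate_repeat(string1, string2, times):
--     result = []
--     for i in range(times):
--         if i % 2 == 0:
--             result.append(string1)
--         else:
--             result.append(string2)
--     return result
--
-- string1 = 'Si'
--
-- string2 = 'O'
-- ===== SOURCE B (Python) =====
-- def alternate_repeat(string1, string2, times):
--     return ([string1, string2] * ((times + 1) // 2))[:times]
-- ===== Notes on version B (the rewrite author's own statement) =====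
-- stated objective: simpler
-- what changed: Replaces the index loop with its parity branch by building the two-element pattern once, repeating it with list multiplication, and trimming with a slice.
import Mathlib
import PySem

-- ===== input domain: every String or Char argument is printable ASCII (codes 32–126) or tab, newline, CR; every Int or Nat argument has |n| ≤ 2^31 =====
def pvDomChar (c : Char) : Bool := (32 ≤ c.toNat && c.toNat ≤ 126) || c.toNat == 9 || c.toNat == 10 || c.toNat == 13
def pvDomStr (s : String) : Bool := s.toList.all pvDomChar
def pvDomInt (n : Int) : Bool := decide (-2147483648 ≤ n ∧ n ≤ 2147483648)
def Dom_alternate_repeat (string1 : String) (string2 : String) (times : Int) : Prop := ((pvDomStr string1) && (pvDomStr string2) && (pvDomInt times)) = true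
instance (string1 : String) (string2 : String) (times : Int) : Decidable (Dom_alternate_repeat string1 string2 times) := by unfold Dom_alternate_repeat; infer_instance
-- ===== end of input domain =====

-- B builds [string1, string2] once, repeats it with list multiplication and trims with a slice,
-- instead of A's index loop with a parity branch; objective: simpler.

-- ===== PORT A =====
def alternate_repeat (string1 : String) (string2 : String) (times : Int) : List String :=
  (PySem.List.pyRange 0 times 1).foldl
    (fun result i =>
      if PySem.Int.mod i 2 = 0 then result ++ [string1] else result ++ [string2])
    []

-- ===== PORT B =====
def alternate_repeat_alt (string1 : String) (string2 : String) (times : Int) : List String :=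
  PySem.List.slice (PySem.List.pyRepeat [string1, string2] (PySem.Int.floordiv (times + 1) 2))
    none (some times)

-- ===== PRECONDITION & SPEC =====
def Spec_alternate_repeat (string1 : String) (string2 : String) (times : Int) (out : List String) : Prop := out = alternate_repeat_alt string1 string2 times
instance (string1 : String) (string2 : String) (times : Int) (out : List String) : Decidable (Spec_alternate_repeat string1 string2 times out) := by unfold Spec_alternate_repeat; infer_instance

-- ===== CLAIM (what is proved, stated in full; the proofs are below) =====
def Claim_equal_alternate_repeat : Prop := ∀ (string1 : String) (string2 : String) (times : Int), Dom_alternate_repeat string1 string2 times → Spec_alternate_repeat string1 string2 times (alternate_repeat string1 string2 times)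

-- ===== LEMMAS AND PROOFS =====

-- A's loop over range(n) produces the parity-indexed map over List.range n.
lemma alternate_repeat_natCast (a b : String) (n : Nat) :
    alternate_repeat a b (n : Int) =
      (List.range n).map (fun i => if i % 2 = 0 then a else b) := by
  induction n with
  | zero => simp [alternate_repeat, PySem.List.pyRange_one_eq_nil]
  | succ n ih =>
    have h : ((n : Int) : Int) ≥ 0 := by positivity
    unfold alternate_repeat
    rw [show ((n + 1 : Nat) : Int) = (n : Int) + 1 by push_cast; ring,
        PySem.List.pyRange_one_succ_right (by positivity), List.foldl_append]
    unfold alternate_repeat at ih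
    rw [ih, List.range_succ, List.map_append]
    have hmod : PySem.Int.mod (n : Int) 2 = ((n % 2 : Nat) : Int) := by
      simp [PySem.Int.mod, Int.fmod_eq_emod]
    simp only [List.foldl_cons, List.foldl_nil, hmod, List.map_cons, List.map_nil]
    by_cases hp : n % 2 = 0 <;> simp [hp]
    omega

-- The cyclic pattern truncated to n equals the parity-indexed map (two-step induction).
lemma cyc (a b : String) (n : Nat) :
    ((List.replicate ((n + 1) / 2) [a, b]).flatten).take n =
      (List.range n).map (fun i => if i % 2 = 0 then a else b) := by
  induction n using Nat.twoStepInduction with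
  | zero => simp
  | one => simp [List.range_succ]
  | more n ih _ =>
    have hc : (n + 2 + 1) / 2 = (n + 1) / 2 + 1 := by omega
    rw [hc, List.replicate_succ, List.flatten_cons]
    have hr : List.range (n + 2) = 0 :: 1 :: (List.range n).map (fun i => i + 2) := by
      rw [List.range_succ_eq_map, List.range_succ_eq_map]
      simp [List.map_map, Function.comp_def, Nat.succ_eq_add_one]
    rw [hr]
    simp only [List.cons_append, List.nil_append, List.take_succ_cons, List.map_cons,
      List.map_map, Function.comp_def]
    rw [ih]
    simp only [Nat.add_mod_right]
    norm_num

theorem alternate_repeat_spec_aux (a b : String) (times : Int) :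
    alternate_repeat a b times = alternate_repeat_alt a b times := by
  cases times with
  | ofNat n =>
    have h1 : PySem.Int.floordiv ((n : Int) + 1) 2 = (((n + 1) / 2 : Nat) : Int) := by
      simp [PySem.Int.floordiv, Int.fdiv_eq_ediv]
    unfold alternate_repeat_alt
    rw [show (Int.ofNat n) = (n : Int) from rfl, h1, alternate_repeat_natCast,
        PySem.List.slice_to_natCast]
    have : PySem.List.pyRepeat [a, b] (((n + 1) / 2 : Nat) : Int)
        = (List.replicate ((n + 1) / 2) [a, b]).flatten := by
      unfold PySem.List.pyRepeat; rw [Int.toNat_natCast]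
    rw [this, cyc]
  | negSucc n =>
    have hneg : Int.negSucc n < 0 := Int.negSucc_lt_zero n
    have hA : alternate_repeat a b (Int.negSucc n) = [] := by
      unfold alternate_repeat
      rw [PySem.List.pyRange_one_eq_nil (by omega)]
      rfl
    have hrep : PySem.List.pyRepeat [a, b] (PySem.Int.floordiv (Int.negSucc n + 1) 2) = [] := by
      have : (PySem.Int.floordiv (Int.negSucc n + 1) 2).toNat = 0 := by
        have h2 : PySem.Int.floordiv (Int.negSucc n + 1) 2 ≤ 0 := by
          simp [PySem.Int.floordiv, Int.fdiv_eq_ediv]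
          omega
        omega
      unfold PySem.List.pyRepeat
      rw [this]
      rfl
    unfold alternate_repeat_alt
    rw [hA, hrep]
    simp [PySem.List.slice]

-- ===== VERDICT (by name: the statement is the Claim_ definition above) =====
theorem alternate_repeat_spec : Claim_equal_alternate_repeat := by
  intro s1 s2 t _
  exact alternate_repeat_spec_aux s1 s2 t
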